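-- pv_equiv track=rewrite | github.com/ilyanormand/fwn-renta | python/unified_parser/engine.py | _detect_column_indices
-- ===== SOURCE A (Python) =====
-- from typing import Dict, Any, List, Optional
--
-- def _detect_column_indices(header_row: List[str]) -> Dict[str, int]:
--     """Detect column indices from header row."""
--     indices = {}
--     if not header_row:
--         return indices
--
--     headers = [str(h).lower() if h else "" for h in header_row]
--
--     # Define keywords for each column type
--     keywords = {
--         'sku': ['reference', 'referencia', 'ref'],
--         'description': ['description', 'conceptos', 'descripción'],
--         'quantity': ['quantity', 'cantidad', 'cant'],
--         'unit_price': ['price', 'precio'],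
--         'total': ['total', 'importe']
--     }
--
--     for col_name, kws in keywords.items():
--         for i, h in enumerate(headers):
--             if any(kw in h for kw in kws):
--                 indices[col_name] = i
--                 break
--
--     return indices
-- ===== SOURCE B (Python) =====
-- from typing import Dict, List
--
-- # Inverted keyword index: keyword -> column type (keys are pairwise distinct).
-- _KW2COL = {
--     'reference': 'sku', 'referencia': 'sku', 'ref': 'sku',
--     'description': 'description', 'conceptos': 'description', 'descripción': 'description',
--     'quantity': 'quantity', 'cantidad': 'quantity', 'cant': 'quantity',
--     'price': 'unit_price', 'precio': 'unit_price',
--     'total': 'total', 'importe': 'total',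
-- }
-- _MAXKW = 11  # longest keyword ('description'/'descripción')
-- _COLS = ['sku', 'description', 'quantity', 'unit_price', 'total']
--
-- def _detect_column_indices(header_row: List[str]) -> Dict[str, int]:
--     """Detect column indices from header row.
--
--     Instead of testing each keyword for containment, enumerate every substring
--     window (length 1.._MAXKW) of each normalized header and look it up in the
--     inverted keyword->column dictionary; a not-yet-assigned column gets the
--     index of the first header producing a hit.
--     """
--     found = {}
--     for i, h in enumerate(header_row):
--         text = str(h).lower() if h else ""
--         for start in range(len(text)):
--             for length in range(1, _MAXKW + 1):
--                 col = _KW2COL.get(text[start:start + length])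
--                 if col is not None and col not in found:
--                     found[col] = i
--     return {c: found[c] for c in _COLS if c in found}
-- ===== Notes on version B (the rewrite author's own statement) =====
-- stated objective: alternative
-- what changed: Replaces A's per-column keyword-containment scans ('kw in header' for each keyword, five passes with break) by an inverted keyword->column dictionary probed with every bounded substring window of each header in a single pass, assigning each still-unassigned column at its first hit and emitting in fixed column order.
import Mathlib
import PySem

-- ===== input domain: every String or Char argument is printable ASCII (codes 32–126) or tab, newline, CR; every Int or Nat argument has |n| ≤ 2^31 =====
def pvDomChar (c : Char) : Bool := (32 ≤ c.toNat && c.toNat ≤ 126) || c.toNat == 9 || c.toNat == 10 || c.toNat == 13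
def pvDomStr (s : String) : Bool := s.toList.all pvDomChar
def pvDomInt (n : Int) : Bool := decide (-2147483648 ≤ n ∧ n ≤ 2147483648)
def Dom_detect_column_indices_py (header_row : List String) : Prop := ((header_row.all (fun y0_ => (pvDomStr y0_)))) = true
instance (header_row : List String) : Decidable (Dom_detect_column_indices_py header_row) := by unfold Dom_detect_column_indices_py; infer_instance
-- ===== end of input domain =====

-- B replaces A's per-column keyword-containment scans by an inverted keyword->column
-- dictionary probed with every bounded substring window of each header, one pass,
-- emitting in fixed column order (objective: alternative algorithm, same result).

-- ===== PORT A =====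
-- the keyword table of A
def pvKeywords : List (String × List String) :=
  [("sku", ["reference", "referencia", "ref"]),
   ("description", ["description", "conceptos", "descripción"]),
   ("quantity", ["quantity", "cantidad", "cant"]),
   ("unit_price", ["price", "precio"]),
   ("total", ["total", "importe"])]

-- 'str(h).lower() if h else ""' (h is a str, so str(h) = h; falsy str = "")
def pvNorm (h : String) : String := if h == "" then "" else PySem.Str.lower h

-- 'any(kw in h for kw in kws)'
def pvMatches (kws : List String) (h : String) : Bool := kws.any (fun kw => PySem.Str.isIn kw h)

-- A's inner loop: 'for i, h in enumerate(headers): if any(...): indices[col_name] = i; break'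
def pvScanA (d : PySem.Dict String Int) (col : String) (kws : List String) :
    List (Int × String) → PySem.Dict String Int
  | [] => d
  | (i, h) :: rest => if pvMatches kws h then d.insert col i else pvScanA d col kws rest

def detect_column_indices_py (header_row : List String) : List (String × Int) :=
  if header_row = [] then (PySem.Dict.empty : PySem.Dict String Int).items
  else
    let headers := header_row.map pvNorm
    (pvKeywords.foldl (fun d p => pvScanA d p.1 p.2 (PySem.List.enumerate headers))
      (PySem.Dict.empty : PySem.Dict String Int)).items

-- ===== PORT B =====
-- B's inverted index _KW2COL (keyword -> column type)
def pvKwPairs : List (String × String) :=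
  [("reference", "sku"), ("referencia", "sku"), ("ref", "sku"),
   ("description", "description"), ("conceptos", "description"), ("descripción", "description"),
   ("quantity", "quantity"), ("cantidad", "quantity"), ("cant", "quantity"),
   ("price", "unit_price"), ("precio", "unit_price"),
   ("total", "total"), ("importe", "total")]

def pvKw2Col : PySem.Dict String String := PySem.Dict.ofList pvKwPairs

def pvCols : List String := ["sku", "description", "quantity", "unit_price", "total"]

-- B's window scan of one header at position i: 'for start in range(len(text)):
--   for length in range(1, 12): col = _KW2COL.get(text[start:start+length]); …'
def pvStepB (d : PySem.Dict String Int) (i : Int) (text : String) : PySem.Dict String Int :=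
  (PySem.List.pyRange 0 (PySem.Str.len text)).foldl (fun d start =>
    (PySem.List.pyRange 1 12).foldl (fun d le =>
      match pvKw2Col.get? (PySem.Str.slice text (some start) (some (start + le))) with
      | some col => if !d.contains col then d.insert col i else d
      | none => d) d) d

def detect_column_indices_py_alt (header_row : List String) : List (String × Int) :=
  let found := (PySem.List.enumerate header_row).foldl
    (fun d p => pvStepB d p.1 (pvNorm p.2)) (PySem.Dict.empty : PySem.Dict String Int)
  pvCols.filterMap (fun c => (found.get? c).map (fun i => (c, i)))

-- ===== PRECONDITION & SPEC =====
def Spec_detect_column_indices_py (header_row : List String) (out : List (String × Int)) : Prop := out = detect_column_indices_py_alt header_row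
instance (header_row : List String) (out : List (String × Int)) : Decidable (Spec_detect_column_indices_py header_row out) := by unfold Spec_detect_column_indices_py; infer_instance

-- ===== CLAIM (what is proved, stated in full; the proofs are below) =====
def Claim_equal_detect_column_indices_py : Prop := ∀ (header_row : List String), Dom_detect_column_indices_py header_row → Spec_detect_column_indices_py header_row (detect_column_indices_py header_row)

-- ===== LEMMAS AND PROOFS =====

-- first index in pairs whose (already normalized) text matches the keywords
def pvFirstIdx (kws : List String) (pairs : List (Int × String)) : Option Int :=
  (pairs.find? (fun p => pvMatches kws p.2)).map (·.1)

theorem pvScanA_eq (d : PySem.Dict String Int) (col : String) (kws : List String)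
    (pairs : List (Int × String)) :
    pvScanA d col kws pairs =
      match pvFirstIdx kws pairs with
      | some i => d.insert col i
      | none => d := by
  induction pairs with
  | nil => simp [pvScanA, pvFirstIdx]
  | cons p rest ih =>
    obtain ⟨i, h⟩ := p
    by_cases hm : pvMatches kws h
    · simp [pvScanA, pvFirstIdx, List.find?, hm]
    · simp only [pvScanA, pvFirstIdx, List.find?] at *
      simp [hm, ih]

theorem pvFoldA_items (pairs : List (Int × String)) :
    ∀ (l : List (String × List String)) (d : PySem.Dict String Int),
      (l.map (·.1)).Nodup → (∀ p ∈ l, d.contains p.1 = false) →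
      (l.foldl (fun d p => pvScanA d p.1 p.2 pairs) d).items =
        d.items ++ l.filterMap (fun p => (pvFirstIdx p.2 pairs).map (fun i => (p.1, i))) := by
  intro l
  induction l with
  | nil => intro d _ _; simp
  | cons q tl ih =>
    intro d hnd hfr
    obtain ⟨c, kws⟩ := q
    simp only [List.map_cons, List.nodup_cons] at hnd
    have hc : d.contains c = false := hfr (c, kws) (List.mem_cons_self)
    cases hfi : pvFirstIdx kws pairs with
    | none =>
      have hstep : pvScanA d c kws pairs = d := by rw [pvScanA_eq, hfi]
      simp only [List.foldl_cons, hstep]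
      rw [ih d hnd.2 (fun p hp => hfr p (List.mem_cons_of_mem _ hp))]
      simp [hfi]
    | some i =>
      have hstep : pvScanA d c kws pairs = d.insert c i := by rw [pvScanA_eq, hfi]
      simp only [List.foldl_cons, hstep]
      rw [ih (d.insert c i) hnd.2 ?_]
      · rw [PySem.Dict.items_insert_of_not_contains d i hc]
        simp [hfi]
      · intro p hp
        rw [PySem.Dict.contains_insert]
        have hne : p.1 ≠ c := by
          intro h; exact hnd.1 (h ▸ (List.mem_map_of_mem hp))
        simp [hne, hfr p (List.mem_cons_of_mem _ hp)]

theorem pvOrIf (i : Int) (p q : Bool) :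
    (if p = true then some i else none).or (if q = true then some i else none)
      = if (p || q) = true then some i else none := by
  cases p <;> simp

theorem pvEnumerate_map {α β : Type} (f : α → β) (xs : List α) (s : Int) :
    PySem.List.enumerate (xs.map f) s = (PySem.List.enumerate xs s).map (fun p => (p.1, f p.2)) := by
  induction xs generalizing s with
  | nil => simp [PySem.List.enumerate_nil]
  | cons x xs ih => simp [PySem.List.enumerate_cons, ih]

-- B-side characterization: some window of text looks up to column c
def pvHit (text : String) (c : String) : Bool :=
  (PySem.List.pyRange 0 (PySem.Str.len text)).any (fun start =>
    (PySem.List.pyRange 1 12).any (fun le =>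
      pvKw2Col.get? (PySem.Str.slice text (some start) (some (start + le))) == some c))

theorem pvKw2Col_nodup : pvKw2Col.keys.Nodup := by decide

theorem pvLink (col : String) (kws : List String) (h : (col, kws) ∈ pvKeywords) (s : String) :
    pvKw2Col.get? s = some col ↔ s ∈ kws := by
  rw [PySem.Dict.get?_eq_some_iff_mem_items pvKw2Col s col pvKw2Col_nodup]
  have hitems : pvKw2Col.items = pvKwPairs := by decide
  rw [hitems]
  fin_cases h <;> simp [pvKwPairs, Prod.mk.injEq, List.mem_cons]

theorem pvKwShape : ∀ p ∈ pvKeywords, ∀ kw ∈ p.2,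
    1 ≤ kw.toList.length ∧ kw.toList.length < 12 := by decide

-- one window probe: look up the window, insert the column if new
theorem pvStep1_get? (i : Int) (d : PySem.Dict String Int) (w : String) (c : String) :
    (match pvKw2Col.get? w with
      | some col => if !d.contains col then d.insert col i else d
      | none => d).get? c
    = (d.get? c).or (if pvKw2Col.get? w == some c then some i else none) := by
  cases hg : pvKw2Col.get? w with
  | none => simp
  | some col =>
    by_cases hcon : d.contains col
    · have hsome : (d.get? col).isSome := by
        rw [← PySem.Dict.contains_eq_isSome_get?]; exact hcon
      obtain ⟨v, hv⟩ := Option.isSome_iff_exists.mp hsome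
      by_cases hcc : col = c
      · subst hcc; simp [hcon, hv]
      · simp [hcon, hcc]
    · by_cases hcc : col = c
      · subst hcc
        have hnone : d.get? col = none :=
          (PySem.Dict.get?_eq_none_iff_contains d col).mpr (by simpa using hcon)
        simp [hcon, PySem.Dict.get?_insert_self, hnone]
      · simp [hcon, hcc, PySem.Dict.get?_insert_of_ne d i (Ne.symm hcc)]

-- innermost loop (over window lengths) as a lookup
theorem pvInner_get? (i start : Int) (text : String) (c : String) :
    ∀ (lens : List Int) (d : PySem.Dict String Int),
      (lens.foldl (fun d le =>
        match pvKw2Col.get? (PySem.Str.slice text (some start) (some (start + le))) with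
        | some col => if !d.contains col then d.insert col i else d
        | none => d) d).get? c
      = (d.get? c).or (if lens.any (fun le =>
          pvKw2Col.get? (PySem.Str.slice text (some start) (some (start + le))) == some c)
          then some i else none) := by
  intro lens
  induction lens with
  | nil => intro d; simp
  | cons le rest ih =>
    intro d
    rw [List.foldl_cons, ih, List.any_cons]
    rw [pvStep1_get? i d (PySem.Str.slice text (some start) (some (start + le))) c,
      Option.or_assoc]
    congr 1
    by_cases hp : pvKw2Col.get? (PySem.Str.slice text (some start) (some (start + le))) == some c <;>
      simp [hp]

-- the start-position loop of one header
theorem pvStarts_get? (i : Int) (text : String) (c : String) :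
    ∀ (starts : List Int) (d : PySem.Dict String Int),
      (starts.foldl (fun d start =>
        (PySem.List.pyRange 1 12).foldl (fun d le =>
          match pvKw2Col.get? (PySem.Str.slice text (some start) (some (start + le))) with
          | some col => if !d.contains col then d.insert col i else d
          | none => d) d) d).get? c
      = (d.get? c).or (if starts.any (fun start =>
          (PySem.List.pyRange 1 12).any (fun le =>
            pvKw2Col.get? (PySem.Str.slice text (some start) (some (start + le))) == some c))
          then some i else none) := by
  intro starts
  induction starts with
  | nil => intro d; simp
  | cons s rest ih =>
    intro d
    simp only [List.foldl_cons, List.any_cons]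
    rw [ih, pvInner_get?, Option.or_assoc]
    congr 1
    exact pvOrIf i _ _

theorem pvStepB_get? (d : PySem.Dict String Int) (i : Int) (text : String) (c : String) :
    (pvStepB d i text).get? c = (d.get? c).or (if pvHit text c then some i else none) := by
  unfold pvStepB pvHit
  rw [pvStarts_get?]

-- B's pass over the headers: first header position whose window scan hits c
theorem pvAcross_get? (c : String) :
    ∀ (pairs : List (Int × String)) (d : PySem.Dict String Int),
      (pairs.foldl (fun d p => pvStepB d p.1 (pvNorm p.2)) d).get? c
      = (d.get? c).or ((pairs.find? (fun p => pvHit (pvNorm p.2) c)).map (·.1)) := by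
  intro pairs
  induction pairs with
  | nil => intro d; simp
  | cons p rest ih =>
    intro d
    simp only [List.foldl_cons]
    rw [ih, pvStepB_get?, Option.or_assoc]
    congr 1
    cases hp : pvHit (pvNorm p.2) c <;> simp [List.find?, hp]

-- the window scan hits c exactly when some keyword of c is a substring (A's test)
theorem pvHit_eq (col : String) (kws : List String) (h : (col, kws) ∈ pvKeywords)
    (text : String) : pvHit text col = pvMatches kws text := by
  rw [Bool.eq_iff_iff]
  unfold pvHit pvMatches
  simp only [List.any_eq_true, beq_iff_eq]
  constructor
  · rintro ⟨start, hstart, le, hle, hget⟩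
    rw [PySem.List.mem_pyRange_one] at hstart hle
    set w := PySem.Str.slice text (some start) (some (start + le)) with hw
    refine ⟨w, (pvLink col kws h w).mp hget, ?_⟩
    rw [PySem.Str.isIn_iff_infix]
    have hwl : w.toList = (text.toList.drop start.toNat).take ((start + le).toNat - start.toNat) := by
      rw [hw, PySem.Str.toList_slice, PySem.Chars.slice_eq_listSlice,
        PySem.List.slice_toNat text.toList (by omega) (by omega)]
    rw [hwl]
    exact ((List.take_prefix _ _).isInfix).trans ((List.drop_suffix _ _).isInfix)
  · rintro ⟨kw, hkw, hin⟩
    rw [PySem.Str.isIn_iff_infix] at hin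
    obtain ⟨s, t, hst⟩ := hin
    obtain ⟨hlen1, hlen2⟩ := pvKwShape (col, kws) h kw hkw
    have hn : text.toList.length = s.length + kw.toList.length + t.length := by
      rw [← hst]; simp; omega
    refine ⟨(s.length : Int), ?_, (kw.toList.length : Int), ?_, ?_⟩
    · rw [PySem.List.mem_pyRange_one]
      rw [PySem.Str.len_eq text]
      omega
    · rw [PySem.List.mem_pyRange_one]; omega
    · have hslice : PySem.Str.slice text (some (s.length : Int))
          (some ((s.length : Int) + (kw.toList.length : Int))) = kw := by
        apply String.toList_inj.mp
        rw [PySem.Str.toList_slice, PySem.Chars.slice_eq_listSlice,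
          PySem.List.slice_natCast_add, ← hst, List.append_assoc,
          List.drop_left, List.take_left]
      rw [hslice]
      exact (pvLink col kws h kw).mpr hkw

-- ===== VERDICT (by name: the statement is the Claim_ definition above) =====
theorem detect_column_indices_py_spec : Claim_equal_detect_column_indices_py := by
  intro header_row _
  unfold Spec_detect_column_indices_py
  cases hhr : header_row with
  | nil => rfl
  | cons h t =>
    unfold detect_column_indices_py detect_column_indices_py_alt
    simp only [reduceCtorEq, if_false]
    rw [pvFoldA_items (PySem.List.enumerate ((h :: t).map pvNorm)) pvKeywords
      PySem.Dict.empty (by decide) (fun p _ => rfl)]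
    rw [show (PySem.Dict.empty : PySem.Dict String Int).items = [] from rfl, List.nil_append]
    rw [show pvCols = pvKeywords.map (·.1) from rfl]
    rw [List.filterMap_map]
    apply List.filterMap_congr
    intro p hp
    have hget := pvAcross_get? p.1 (PySem.List.enumerate (h :: t)) PySem.Dict.empty
    simp only [Function.comp_apply]
    rw [hget]
    rw [show (PySem.Dict.empty : PySem.Dict String Int).get? p.1 = none from rfl, Option.none_or]
    unfold pvFirstIdx
    rw [pvEnumerate_map pvNorm (h :: t) 0, List.find?_map, Option.map_map]
    have hpred : (fun q : Int × String => pvHit (pvNorm q.2) p.1)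
        = ((fun q : Int × String => pvMatches p.2 q.2) ∘ (fun q : Int × String => (q.1, pvNorm q.2))) := by
      funext q
      exact pvHit_eq p.1 p.2 (by rwa [← Prod.mk.eta (p := p)] at hp) (pvNorm q.2)
    rw [hpred]
    simp only [Option.map_map]
    exact rfl
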